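-- pv_equiv track=rewrite | github.com/huiliang2liu/decompil | main.py | diff_set_start
-- ===== SOURCE A (Python) =====
-- def diff_set_start(source, tar):
--     diff = []
--     for s in source:
--         has = False
--         for t in tar:
--             if str(s).startswith(str(t)):
--                 has = True
--                 break
--         if not has:
--             diff.append(s)
--     return diff
-- ===== SOURCE B (Python) =====
-- def diff_set_start(source, tar):
--     tset = {str(t) for t in tar}
--     lens = {len(t) for t in tset}
--     return [s for s in source
--             if not any(str(s)[:L] in tset for L in lens)]
-- ===== Notes on version B (the rewrite author's own statement) =====
-- stated objective: faster
-- what changed: Replaces the per-item linear scan over tar with a precomputed set of tar strings plus the set of their distinct lengths, deciding each source item by hashed membership tests of its prefixes s[:L].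
import Mathlib
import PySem

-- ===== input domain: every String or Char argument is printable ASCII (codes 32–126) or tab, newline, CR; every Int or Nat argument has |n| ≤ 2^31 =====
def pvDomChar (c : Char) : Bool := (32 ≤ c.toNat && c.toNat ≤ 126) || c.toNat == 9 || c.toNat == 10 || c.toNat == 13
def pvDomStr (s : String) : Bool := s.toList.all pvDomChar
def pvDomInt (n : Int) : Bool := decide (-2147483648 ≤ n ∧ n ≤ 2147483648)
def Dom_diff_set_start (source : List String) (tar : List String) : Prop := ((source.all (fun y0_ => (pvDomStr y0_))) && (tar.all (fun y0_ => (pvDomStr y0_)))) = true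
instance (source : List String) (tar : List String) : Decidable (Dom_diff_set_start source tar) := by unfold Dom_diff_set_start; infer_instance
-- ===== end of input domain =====

-- ===== PORT A =====
-- B replaces A's inner scan over `tar` with a set of tar strings plus the set of their
-- lengths, so each source item is decided by set lookups on its prefixes (objective: faster
-- when tar is large with few distinct lengths).

-- inner 'for t in tar: … break' loop of A: recursion returning at the first match (the break)
def pvHasA (s : String) : List String → Bool
  | [] => false
  | t :: ts => if PySem.Str.startswith s t then true else pvHasA s ts

def diff_set_start (source : List String) (tar : List String) : List String :=
  source.foldl (fun diff s => if pvHasA s tar then diff else diff ++ [s]) []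

-- ===== PORT B =====
-- any(str(s)[:L] in tset for L in lens)
def pvHasB (tset : PySem.Set String) (lens : PySem.Set Int) (s : String) : Bool :=
  lens.any (fun L => PySem.Set.contains tset (PySem.Str.slice s none (some L)))

def diff_set_start_alt (source : List String) (tar : List String) : List String :=
  let tset : PySem.Set String := PySem.Set.ofList tar
  let lens : PySem.Set Int := PySem.Set.ofList (tset.map PySem.Str.len)
  source.filter (fun s => !pvHasB tset lens s)

-- ===== PRECONDITION & SPEC =====
def Spec_diff_set_start (source : List String) (tar : List String) (out : List String) : Prop := out = diff_set_start_alt source tar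
instance (source : List String) (tar : List String) (out : List String) : Decidable (Spec_diff_set_start source tar out) := by unfold Spec_diff_set_start; infer_instance

-- ===== CLAIM (what is proved, stated in full; the proofs are below) =====
def Claim_equal_diff_set_start : Prop := ∀ (source : List String) (tar : List String), Dom_diff_set_start source tar → Spec_diff_set_start source tar (diff_set_start source tar)

-- ===== LEMMAS AND PROOFS =====

theorem pvHasA_eq_any (s : String) (l : List String) :
    pvHasA s l = l.any (fun t => PySem.Str.startswith s t) := by
  induction l with
  | nil => rfl
  | cons t ts ih =>
    simp only [pvHasA, List.any_cons, ih]
    cases PySem.Str.startswith s t <;> simp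

theorem slice_toList (s : String) (n : Nat) :
    (PySem.Str.slice s none (some (n : Int))).toList = s.toList.take n := by
  simp [PySem.Str.slice, PySem.List.slice_to_natCast]

theorem pvHas_agree (s : String) (tar : List String) :
    pvHasA s tar
      = pvHasB (PySem.Set.ofList tar)
          (PySem.Set.ofList ((PySem.Set.ofList tar).map PySem.Str.len)) s := by
  rw [Bool.eq_iff_iff, pvHasA_eq_any]
  unfold pvHasB
  simp only [List.any_eq_true, PySem.Str.startswith_eq, PySem.Chars.startswith_iff,
    PySem.Set.contains, List.elem_iff, PySem.Set.mem_ofList, List.mem_map]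
  constructor
  · rintro ⟨t, ht, hpre⟩
    refine ⟨PySem.Str.len t, ⟨t, ht, rfl⟩, ?_⟩
    have hlen : PySem.Str.len t = ((t.toList.length : Nat) : Int) := PySem.Str.len_eq t
    rw [hlen]
    have : (PySem.Str.slice s none (some ((t.toList.length : Nat) : Int))) = t := by
      apply String.toList_inj.mp
      rw [slice_toList]
      exact (List.prefix_iff_eq_take.mp hpre).symm
    rw [this]; exact ht
  · rintro ⟨L, ⟨t0, _, hL⟩, hmem⟩
    refine ⟨PySem.Str.slice s none (some L), hmem, ?_⟩
    have hlen : L = ((t0.toList.length : Nat) : Int) := by rw [← hL]; exact PySem.Str.len_eq t0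
    rw [hlen, slice_toList]
    exact List.take_prefix _ _

-- ===== VERDICT (by name: the statement is the Claim_ definition above) =====
theorem diff_set_start_spec : Claim_equal_diff_set_start := by
  intro source tar _
  unfold Spec_diff_set_start diff_set_start diff_set_start_alt
  have hpt : ∀ (diff : List String) (s : String),
      (if pvHasA s tar then diff else diff ++ [s])
        = (if (!pvHasB (PySem.Set.ofList tar)
              (PySem.Set.ofList ((PySem.Set.ofList tar).map PySem.Str.len)) s) = true
           then diff ++ [s] else diff) := by
    intro diff s
    rw [← pvHas_agree]
    cases pvHasA s tar <;> simp
  calc source.foldl (fun diff s => if pvHasA s tar then diff else diff ++ [s]) []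
      = source.foldl (fun diff s =>
          if (!pvHasB (PySem.Set.ofList tar)
              (PySem.Set.ofList ((PySem.Set.ofList tar).map PySem.Str.len)) s) = true
          then diff ++ [s] else diff) [] := by
        exact PySem.List.foldl_congr_mem _ _ _ _ (fun acc x _ => hpt acc x)
    _ = _ := by rw [PySem.List.foldl_append_if_eq_filter]; rfl
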